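-- pv_equiv track=rewrite | github.com/Ovid/sqlitch-v2 | sqlitch/cli/commands/config.py | _section_has_entries
-- ===== SOURCE A (Python) =====
-- def _find_next_section(lines: list[str], start: int) -> int:
--     for idx in range(start, len(lines)):
--         stripped = lines[idx].strip()
--         if stripped.startswith("[") and stripped.endswith("]") and not stripped.startswith("#"):
--             return idx
--     return len(lines)
--
-- def _section_has_entries(lines: list[str], header_index: int) -> bool:
--     start = header_index + 1
--     end = _find_next_section(lines, start)
--     for idx in range(start, end):
--         stripped = lines[idx].strip()
--         if stripped and not stripped.startswith("#") and not stripped.startswith(";"):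
--             return True
--     return False
-- ===== SOURCE B (Python) =====
-- def _section_has_entries(lines: list[str], header_index: int) -> bool:
--     # Single pass from header_index+1: stop (False) at the next section header,
--     # report True at the first non-comment, non-empty line.
--     for idx in range(header_index + 1, len(lines)):
--         stripped = lines[idx].strip()
--         if stripped.startswith("[") and stripped.endswith("]") and not stripped.startswith("#"):
--             return False
--         if stripped and not stripped.startswith("#") and not stripped.startswith(";"):
--             return True
--     return False
-- ===== Notes on version B (the rewrite author's own statement) =====
-- stated objective: faster
-- what changed: Replaces the two-phase structure (a _find_next_section scan to find the section end, then a second scan over [start,end) for entries) with a single pass from header_index+1 that returns False at the first section header and True at the first entry line, stripping each line once instead of twice.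
-- outside the precondition, e.g. on _section_has_entries(['[a]'], -3): A raises IndexError, B raises IndexError
import Mathlib
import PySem

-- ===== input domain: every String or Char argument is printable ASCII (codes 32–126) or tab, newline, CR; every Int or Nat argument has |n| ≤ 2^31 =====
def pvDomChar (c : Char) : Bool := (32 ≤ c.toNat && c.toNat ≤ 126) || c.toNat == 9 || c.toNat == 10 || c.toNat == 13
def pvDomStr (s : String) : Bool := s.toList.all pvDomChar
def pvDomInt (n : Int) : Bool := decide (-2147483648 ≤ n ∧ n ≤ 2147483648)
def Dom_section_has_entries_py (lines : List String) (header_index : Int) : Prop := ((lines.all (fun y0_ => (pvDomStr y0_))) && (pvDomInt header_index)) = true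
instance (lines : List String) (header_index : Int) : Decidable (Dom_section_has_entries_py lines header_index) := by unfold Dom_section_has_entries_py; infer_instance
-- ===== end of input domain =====

-- B merges A's two sequential scans (find the next section header, then scan that
-- slice for an entry) into one loop that decides at the first header or entry line.

-- ===== PORT A =====
-- 'stripped.startswith("[") and stripped.endswith("]") and not stripped.startswith("#")'
def pvIsHeader (s : String) : Bool :=
  PySem.Str.startswith s "[" && PySem.Str.endswith s "]" && !PySem.Str.startswith s "#"

-- 'stripped and not stripped.startswith("#") and not stripped.startswith(";")'
def pvIsEntry (s : String) : Bool :=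
  !(s == "") && !PySem.Str.startswith s "#" && !PySem.Str.startswith s ";"

-- the loop of _find_next_section over range(start, len(lines))
def pvFindGo (lines : List String) : List Int → Int
  | [] => (lines.length : Int)
  | idx :: rest =>
    let stripped := PySem.Str.strip (PySem.List.pyGetD lines idx "")
    if pvIsHeader stripped then idx else pvFindGo lines rest

def pvFindNextSection (lines : List String) (start : Int) : Int :=
  pvFindGo lines (PySem.List.pyRange start (lines.length : Int) 1)

-- the loop of _section_has_entries over range(start, end)
def pvEntryGo (lines : List String) : List Int → Bool
  | [] => false
  | idx :: rest =>
    let stripped := PySem.Str.strip (PySem.List.pyGetD lines idx "")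
    if pvIsEntry stripped then true else pvEntryGo lines rest

def section_has_entries_py (lines : List String) (header_index : Int) : Bool :=
  let start := header_index + 1
  let e := pvFindNextSection lines start
  pvEntryGo lines (PySem.List.pyRange start e 1)

-- ===== PORT B =====
-- B's single loop over range(header_index+1, len(lines))
def pvScanGo (lines : List String) : List Int → Bool
  | [] => false
  | idx :: rest =>
    let stripped := PySem.Str.strip (PySem.List.pyGetD lines idx "")
    if pvIsHeader stripped then false
    else if pvIsEntry stripped then true
    else pvScanGo lines rest

def section_has_entries_py_alt (lines : List String) (header_index : Int) : Bool :=
  pvScanGo lines (PySem.List.pyRange (header_index + 1) (lines.length : Int) 1)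

-- ===== PRECONDITION & SPEC =====
-- Pre_ excludes header_index + 1 < -len(lines): there the Python A (and B alike)
-- raises IndexError on the first negative-index access.
def Pre_section_has_entries_py (lines : List String) (header_index : Int) : Prop :=
  -(lines.length : Int) ≤ header_index + 1
instance (lines : List String) (header_index : Int) : Decidable (Pre_section_has_entries_py lines header_index) := by unfold Pre_section_has_entries_py; infer_instance

def pvWitness_section_has_entries_py : List String × Int := (["[core]", "engine = sqlite", "[other]"], 0)

def Spec_section_has_entries_py (lines : List String) (header_index : Int) (out : Bool) : Prop := out = section_has_entries_py_alt lines header_index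
instance (lines : List String) (header_index : Int) (out : Bool) : Decidable (Spec_section_has_entries_py lines header_index out) := by unfold Spec_section_has_entries_py; infer_instance

-- ===== CLAIM (what is proved, stated in full; the proofs are below) =====
def Claim_equal_section_has_entries_py : Prop := ∀ (lines : List String) (header_index : Int), Dom_section_has_entries_py lines header_index → Pre_section_has_entries_py lines header_index → Spec_section_has_entries_py lines header_index (section_has_entries_py lines header_index)

-- ===== LEMMAS AND PROOFS =====

-- pvFindGo returns either the default len(lines) or a member of the scanned range
theorem pvFindGo_mem_or (lines : List String) (r : List Int) :
    pvFindGo lines r = (lines.length : Int) ∨ pvFindGo lines r ∈ r := by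
  induction r with
  | nil => left; rfl
  | cons idx rest ih =>
    simp only [pvFindGo]
    split
    · right; exact List.mem_cons_self
    · rcases ih with h | h
      · left; exact h
      · right; exact List.mem_cons_of_mem _ h

theorem pvFindNextSection_lb (lines : List String) (start : Int)
    (hs : start ≤ (lines.length : Int)) :
    start ≤ pvFindNextSection lines start := by
  rcases pvFindGo_mem_or lines (PySem.List.pyRange start (lines.length : Int) 1) with h | h
  · unfold pvFindNextSection
    rw [h]
    exact hs
  · have := (PySem.List.mem_pyRange_one).1 h
    unfold pvFindNextSection
    omega

-- the heart: A's two-phase computation from start equals B's single scan from start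
theorem pv_main (lines : List String) :
    ∀ (n : Nat) (start : Int), (lines.length : Int) ≤ start + n →
      pvEntryGo lines (PySem.List.pyRange start (pvFindNextSection lines start) 1)
        = pvScanGo lines (PySem.List.pyRange start (lines.length : Int) 1) := by
  intro n
  induction n with
  | zero =>
    intro start h
    have hle : (lines.length : Int) ≤ start := by omega
    have hnil : PySem.List.pyRange start (lines.length : Int) 1 = [] :=
      PySem.List.pyRange_one_eq_nil hle
    have he : pvFindNextSection lines start = (lines.length : Int) := by
      unfold pvFindNextSection; rw [hnil]; rfl
    rw [he, PySem.List.pyRange_one_eq_nil hle]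
    rfl
  | succ m ih =>
    intro start h
    by_cases hlt : start < (lines.length : Int)
    · have hcons := PySem.List.pyRange_one_cons hlt
      rw [hcons]
      simp only [pvScanGo]
      by_cases hh : pvIsHeader (PySem.Str.strip (PySem.List.pyGetD lines start "")) = true
      · -- header at start: A's end = start, empty slice ⇒ false; B returns false
        have he : pvFindNextSection lines start = start := by
          unfold pvFindNextSection
          rw [hcons]
          simp [pvFindGo, hh]
        rw [he, PySem.List.pyRange_one_eq_nil le_rfl]
        simp [pvEntryGo, hh]
      · -- no header at start: A's end = findNext(start+1) > start
        have he : pvFindNextSection lines start = pvFindNextSection lines (start + 1) := by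
          unfold pvFindNextSection
          rw [hcons]
          simp [pvFindGo, hh]
        have hlb := pvFindNextSection_lb lines (start + 1) (by omega)
        rw [he, PySem.List.pyRange_one_cons (by omega)]
        simp only [pvEntryGo, hh]
        by_cases hent : pvIsEntry (PySem.Str.strip (PySem.List.pyGetD lines start "")) = true
        · simp [hent]
        · simp only [hent, if_false, Bool.false_eq_true]
          exact ih (start + 1) (by omega)
    · have hle : (lines.length : Int) ≤ start := by omega
      have hnil : PySem.List.pyRange start (lines.length : Int) 1 = [] :=
        PySem.List.pyRange_one_eq_nil hle
      have he : pvFindNextSection lines start = (lines.length : Int) := by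
        unfold pvFindNextSection; rw [hnil]; rfl
      rw [he, hnil]
      rfl

-- ===== VERDICT (by name: the statement is the Claim_ definition above) =====
theorem section_has_entries_py_spec : Claim_equal_section_has_entries_py := by
  intro lines header_index _ _
  unfold Spec_section_has_entries_py section_has_entries_py section_has_entries_py_alt
  exact pv_main lines ((lines.length : Int) - (header_index + 1)).toNat (header_index + 1) (by omega)
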